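-- pv_equiv track=rewrite | github.com/roybbs/similarity_matrix_proc | matrix_gen/ngram_gen.py | makeUniqNgrams
-- ===== SOURCE A (Python) =====
-- def makeUniqNgrams(ngrams,src,n_of_ngram):
--   buf = ["" for i in range(0,n_of_ngram)]
--   num_appended_elements = 0
--   index = 0
--
--   for element in src:
--     #element = element.strip('\r\n')
--     #if element == "":
--     #  continue
--
--     if num_appended_elements < (n_of_ngram-1):
--       buf[index] = element
--       index += 1
--       num_appended_elements += 1
--       continue
--
--     buf[index] = element
--     index += 1
--     index %= n_of_ngram
--
--     seq = buf[index]
--     for j in range(1,n_of_ngram):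
--       seq = seq + " " + buf[(index + j) % n_of_ngram]
--     ngrams.add( seq )
--
--   return ngrams
-- ===== SOURCE B (Python) =====
-- def makeUniqNgrams(ngrams, src, n_of_ngram):
--   lst = list(src)
--   if n_of_ngram >= 1:
--     for i in range(len(lst) - n_of_ngram + 1):
--       ngrams.add(" ".join(lst[i:i+n_of_ngram]))
--   return ngrams
-- ===== Notes on version B (the rewrite author's own statement) =====
-- stated objective: simpler
-- what changed: Replaces the circular-buffer bookkeeping (rotating index, modular reads, repeated string concatenation per n-gram) with direct window slicing: each n-token slice of the materialized sequence is joined in one ' '.join and added to the set; measured faster since join builds each n-gram in one pass instead of n successive concatenations.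
import Mathlib
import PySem

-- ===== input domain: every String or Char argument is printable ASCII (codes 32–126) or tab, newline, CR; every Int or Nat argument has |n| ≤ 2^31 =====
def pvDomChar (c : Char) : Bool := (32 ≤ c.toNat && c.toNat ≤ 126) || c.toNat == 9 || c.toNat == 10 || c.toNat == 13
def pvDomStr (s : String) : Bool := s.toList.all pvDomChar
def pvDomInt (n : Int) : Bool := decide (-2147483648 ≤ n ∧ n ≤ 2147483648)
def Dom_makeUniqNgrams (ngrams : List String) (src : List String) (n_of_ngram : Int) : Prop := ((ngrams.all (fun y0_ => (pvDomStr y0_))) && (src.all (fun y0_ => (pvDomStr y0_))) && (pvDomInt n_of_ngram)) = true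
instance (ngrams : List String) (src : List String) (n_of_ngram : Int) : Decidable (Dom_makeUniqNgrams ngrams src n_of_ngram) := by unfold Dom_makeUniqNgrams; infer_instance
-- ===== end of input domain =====

-- B replaces A's circular-buffer bookkeeping with direct window slicing (simpler); equivalence is about the
-- RETURN value (both Pythons also mutate the ngrams set in place, identically).

-- ===== PORT A =====
-- one iteration of A's 'for element in src' loop; state = (ngrams, buf, num_appended_elements, index).
-- buf[index] reads/writes are via List.set / pyGetD: inside Pre_ the index is always in range, as in the Python.
def pvStepA (n_of_ngram : Int) (st : List String × List String × Int × Int) (element : String) :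
    List String × List String × Int × Int :=
  let ng := st.1
  let buf := st.2.1
  let num := st.2.2.1
  let index := st.2.2.2
  if num < n_of_ngram - 1 then
    (ng, buf.set index.toNat element, num + 1, index + 1)
  else
    let buf' := buf.set index.toNat element
    let index' := PySem.Int.mod (index + 1) n_of_ngram
    let seq0 := PySem.List.pyGetD buf' index' ""
    let seq := (PySem.List.pyRange 1 n_of_ngram 1).foldl
      (fun seq j => seq ++ " " ++ PySem.List.pyGetD buf' (PySem.Int.mod (index' + j) n_of_ngram) "") seq0
    (PySem.Set.add ng seq, buf', num, index')

def makeUniqNgrams (ngrams : List String) (src : List String) (n_of_ngram : Int) : List String :=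
  let buf := (PySem.List.pyRange 0 n_of_ngram 1).map (fun _ => "")
  (src.foldl (pvStepA n_of_ngram) (ngrams, buf, 0, 0)).1

-- ===== PORT B =====
def makeUniqNgrams_alt (ngrams : List String) (src : List String) (n_of_ngram : Int) : List String :=
  let lst := src
  if 1 ≤ n_of_ngram then
    (PySem.List.pyRange 0 (PySem.List.len lst - n_of_ngram + 1) 1).foldl
      (fun ng i => PySem.Set.add ng
        (PySem.Str.join " " (PySem.List.slice lst (some i) (some (i + n_of_ngram)))))
      ngrams
  else ngrams

-- ===== PRECONDITION & SPEC =====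
-- A raises IndexError (buf is empty) when n_of_ngram ≤ 0 and src is nonempty; those inputs are excluded.
def Pre_makeUniqNgrams (ngrams : List String) (src : List String) (n_of_ngram : Int) : Prop :=
  src = [] ∨ 1 ≤ n_of_ngram
instance (ngrams : List String) (src : List String) (n_of_ngram : Int) : Decidable (Pre_makeUniqNgrams ngrams src n_of_ngram) := by unfold Pre_makeUniqNgrams; infer_instance
def pvWitness_makeUniqNgrams : List String × List String × Int := (["a b"], ["x", "y", "z"], 2)

def Spec_makeUniqNgrams (ngrams : List String) (src : List String) (n_of_ngram : Int) (out : List String) : Prop := out = makeUniqNgrams_alt ngrams src n_of_ngram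
instance (ngrams : List String) (src : List String) (n_of_ngram : Int) (out : List String) : Decidable (Spec_makeUniqNgrams ngrams src n_of_ngram out) := by unfold Spec_makeUniqNgrams; infer_instance

-- ===== CLAIM (what is proved, stated in full; the proofs are below) =====
def Claim_equal_makeUniqNgrams : Prop := ∀ (ngrams : List String) (src : List String) (n_of_ngram : Int), Dom_makeUniqNgrams ngrams src n_of_ngram → Pre_makeUniqNgrams ngrams src n_of_ngram → Spec_makeUniqNgrams ngrams src n_of_ngram (makeUniqNgrams ngrams src n_of_ngram)
-- ===== LEMMAS AND PROOFS =====

-- rotated view of A's circular buffer: oldest-to-newest order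
def pvRot (buf : List String) (i : Nat) : List String := buf.drop i ++ buf.take i

-- the windows A's main branch adds, one per remaining element
def pvCoreW (w : List String) : List String → List (List String)
  | [] => []
  | e :: rest => (w.tail ++ [e]) :: pvCoreW (w.tail ++ [e]) rest

def pvAddJoin (ng : List String) (v : List String) : List String :=
  PySem.Set.add ng (PySem.Str.join " " v)

theorem pvJoin_glue (s x : String) (xs : List String) :
    PySem.Str.join " " ((s ++ " " ++ x) :: xs) = PySem.Str.join " " (s :: x :: xs) := by
  apply String.toList_inj.mp
  cases xs with
  | nil => simp [PySem.Str.toList_join, PySem.Chars.join_singleton, PySem.Chars.join_cons_cons]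
  | cons y ys => simp [PySem.Str.toList_join, PySem.Chars.join_cons_cons]

theorem pvFoldConcat (l : List String) (s : String) :
    l.foldl (fun acc x => acc ++ " " ++ x) s = PySem.Str.join " " (s :: l) := by
  induction l generalizing s with
  | nil =>
    apply String.toList_inj.mp
    simp [PySem.Str.toList_join, PySem.Chars.join_singleton]
  | cons x xs ih => simp only [List.foldl_cons, ih, pvJoin_glue]

theorem pvMapGetD (l : List String) (d : String) :
    (List.range l.length).map (fun k => l.getD k d) = l := by
  apply List.ext_getElem
  · simp
  · intro i h1 h2
    simp [List.getD_eq_getElem?_getD, h2]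

-- join of a list rebuilt element by element from getD
theorem pvFoldGetD (l : List String) (h : l ≠ []) :
    (List.range (l.length - 1)).foldl (fun seq k => seq ++ " " ++ l.getD (k + 1) "") (l.getD 0 "")
      = PySem.Str.join " " l := by
  cases l with
  | nil => exact absurd rfl h
  | cons hd t =>
    simp only [List.length_cons, Nat.add_sub_cancel, List.getD_cons_succ, List.getD_cons_zero]
    rw [← List.foldl_map (f := fun k => t.getD k "") (g := fun acc x => acc ++ " " ++ x),
      pvMapGetD, pvFoldConcat]

theorem pvRot_getD (buf : List String) (i j : Nat) (hi : i < buf.length) (hj : j < buf.length) :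
    (pvRot buf i).getD j "" = buf.getD ((i + j) % buf.length) "" := by
  unfold pvRot
  simp only [List.getD_eq_getElem?_getD]
  by_cases hc : j < buf.length - i
  · rw [List.getElem?_append_left (by simp; omega), List.getElem?_drop,
      Nat.mod_eq_of_lt (by omega)]
  · have h1 : (i + j) % buf.length = j - (buf.length - i) := by
      rw [Nat.mod_eq_sub_mod (by omega), Nat.mod_eq_of_lt (by omega)]
      omega
    rw [List.getElem?_append_right (by simp; omega), List.length_drop,
      List.getElem?_take, if_pos (by omega), h1]

theorem pvRot_length (buf : List String) (i : Nat) : (pvRot buf i).length = buf.length := by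
  simp [pvRot]; omega

-- A's inner seq loop computes the join of the rotated buffer
theorem pvSeqEq (buf : List String) (i : Nat) (n : Int) (hn : buf.length = n.toNat)
    (hi : i < buf.length) :
    (PySem.List.pyRange 1 n 1).foldl
        (fun seq j => seq ++ " " ++ PySem.List.pyGetD buf (PySem.Int.mod ((i : Int) + j) n) "")
        (PySem.List.pyGetD buf (i : Int) "")
      = PySem.Str.join " " (pvRot buf i) := by
  have hrlen : (pvRot buf i).length = buf.length := pvRot_length buf i
  have hrotne : pvRot buf i ≠ [] := by
    intro hnil
    rw [hnil] at hrlen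
    simp at hrlen
    omega
  rw [PySem.List.pyRange_one, List.foldl_map,
    PySem.List.foldl_congr_mem _ _
      (fun seq k => seq ++ " " ++ (pvRot buf i).getD (k + 1) "") _ ?_]
  · have hinit : PySem.List.pyGetD buf (i : Int) "" = (pvRot buf i).getD 0 "" := by
      rw [PySem.List.pyGetD_natCast, pvRot_getD buf i 0 hi (by omega)]
      simp [Nat.mod_eq_of_lt hi]
    have hcnt : (n - 1).toNat = (pvRot buf i).length - 1 := by omega
    rw [hinit, hcnt]
    exact pvFoldGetD (pvRot buf i) hrotne
  · intro seq k hk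
    rw [List.mem_range] at hk
    have h2 : PySem.Int.mod ((i : Int) + (1 + (k : Int))) n
        = (((i + (k + 1)) % buf.length : Nat) : Int) := by
      rw [PySem.Int.mod_eq_emod_of_pos (by omega)]
      have e1 : ((i : Int) + (1 + (k : Int))) = ((i + (k + 1) : Nat) : Int) := by
        push_cast
        ring
      have e2 : n = ((buf.length : Nat) : Int) := by omega
      rw [e1, e2]
      exact (Int.natCast_mod _ _).symm
    rw [h2, PySem.List.pyGetD_natCast, ← pvRot_getD buf i (k + 1) hi (by omega)]

-- one main-branch step rotates the window by one and appends the new element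
theorem pvRot_set (buf : List String) (i : Nat) (e : String) (hi : i < buf.length) :
    pvRot (buf.set i e) ((i + 1) % buf.length) = (pvRot buf i).tail ++ [e] := by
  have hrhs : (pvRot buf i).tail = buf.drop (i + 1) ++ buf.take i := by
    unfold pvRot
    rw [List.drop_eq_getElem_cons hi, List.cons_append, List.tail_cons]
  by_cases hc : i + 1 < buf.length
  · rw [Nat.mod_eq_of_lt hc, hrhs]
    unfold pvRot
    rw [List.drop_set, if_pos (by omega), List.take_set,
      List.take_succ_eq_append_getElem hi,
      List.set_append_right _ _ (by simp [Nat.min_eq_left (Nat.le_of_lt hi)]),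
      List.append_assoc]
    simp [Nat.min_eq_left (Nat.le_of_lt hi)]
  · have hlen : i + 1 = buf.length := by omega
    rw [← hlen, Nat.mod_self, hrhs]
    unfold pvRot
    rw [List.drop_zero, List.take_zero, List.append_nil,
      List.set_eq_take_append_cons_drop, if_pos hi]
    have hd : buf.drop (i + 1) = [] := by rw [hlen]; simp
    simp [hd]

theorem pvMainA (n : Int) (hn : 1 ≤ n) (rest : List String) :
    ∀ (ng buf : List String) (i : Nat), buf.length = n.toNat → i < n.toNat →
    (rest.foldl (pvStepA n) (ng, buf, n - 1, (i : Int))).1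
      = (pvCoreW (pvRot buf i) rest).foldl pvAddJoin ng := by
  induction rest with
  | nil => intro ng buf i _ _; simp [pvCoreW]
  | cons e rest ih =>
    intro ng buf i h1 h2
    have hilt : i < buf.length := by omega
    have hpos : 0 < buf.length := by omega
    rw [List.foldl_cons]
    have hblen : (buf.set i e).length = n.toNat := by simpa using h1
    have hi' : (i + 1) % buf.length < (buf.set i e).length := by
      simpa using Nat.mod_lt _ hpos
    have hstep : pvStepA n (ng, buf, n - 1, (i : Int)) e
        = (PySem.Set.add ng (PySem.Str.join " " (pvRot (buf.set i e) ((i + 1) % buf.length))),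
           buf.set i e, n - 1, (((i + 1) % buf.length : Nat) : Int)) := by
      simp only [pvStepA]
      rw [if_neg (by omega)]
      have hidx : PySem.Int.mod ((i : Int) + 1) n = (((i + 1) % buf.length : Nat) : Int) := by
        rw [PySem.Int.mod_eq_emod_of_pos (by omega)]
        have e1 : ((i : Int) + 1) = ((i + 1 : Nat) : Int) := by push_cast; ring
        have e2 : n = ((buf.length : Nat) : Int) := by omega
        rw [e1, e2]
        exact (Int.natCast_mod _ _).symm
      simp only [Int.toNat_natCast, hidx]
      rw [pvSeqEq (buf.set i e) ((i + 1) % buf.length) n hblen hi']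
    rw [hstep, ih _ _ _ hblen (by omega), pvRot_set buf i e hilt]
    rfl

theorem pvCoreW_windows (rest : List String) :
    ∀ (w : List String), w ≠ [] →
    pvCoreW w rest
      = (List.range rest.length).map (fun k => ((w.tail ++ rest).drop k).take w.length) := by
  induction rest with
  | nil => intro w _; simp [pvCoreW]
  | cons e rest ih =>
    intro w hw
    obtain ⟨a, t, rfl⟩ : ∃ a t, w = a :: t := by
      cases w with
      | nil => exact absurd rfl hw
      | cons a t => exact ⟨a, t, rfl⟩
    rw [show pvCoreW (a :: t) (e :: rest) = (t ++ [e]) :: pvCoreW (t ++ [e]) rest from rfl,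
      ih (t ++ [e]) (by simp)]
    simp only [List.length_cons, List.range_succ_eq_map, List.map_cons, List.map_map,
      List.tail_cons]
    have htail : (t ++ [e]).tail ++ rest = (t ++ e :: rest).tail := by
      cases t <;> simp
    congr 1
    · rw [List.drop_zero, List.take_append]
      simp
    · apply List.map_congr_left
      intro k _
      rw [htail]
      have hdrop : ((t ++ e :: rest).tail).drop k = (t ++ e :: rest).drop (k + 1) := by
        rw [← List.drop_one, List.drop_drop, Nat.add_comm]
      rw [hdrop]
      simp

theorem pvFillA (n : Int) (hn : 1 ≤ n) (pre : List String) :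
    ∀ (done ng : List String), done.length + pre.length ≤ n.toNat - 1 →
    pre.foldl (pvStepA n)
        (ng, done ++ List.replicate (n.toNat - done.length) "", (done.length : Int), (done.length : Int))
      = (ng, (done ++ pre) ++ List.replicate (n.toNat - (done ++ pre).length) "",
          ((done ++ pre).length : Int), ((done ++ pre).length : Int)) := by
  induction pre with
  | nil => intro done ng _; simp
  | cons e pre ih =>
    intro done ng h
    rw [List.foldl_cons]
    have hrep : List.replicate (n.toNat - done.length) ("" : String)
        = "" :: List.replicate (n.toNat - (done.length + 1)) "" := by
      rw [← List.replicate_succ]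
      congr 1
      simp at h
      omega
    have hstep : pvStepA n
        (ng, done ++ List.replicate (n.toNat - done.length) "", (done.length : Int),
          (done.length : Int)) e
        = (ng, (done ++ [e]) ++ List.replicate (n.toNat - (done ++ [e]).length) "",
            (((done ++ [e]).length : Nat) : Int), (((done ++ [e]).length : Nat) : Int)) := by
      simp only [pvStepA]
      rw [if_pos (by simp at h ⊢; omega)]
      simp only [Int.toNat_natCast, hrep]
      rw [List.set_append_right _ _ (le_refl done.length), Nat.sub_self, List.set_cons_zero]
      simp
    rw [hstep, ih (done ++ [e]) ng (by simp at h ⊢; omega)]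
    simp

theorem pvBuf0 (n : Int) :
    ((PySem.List.pyRange 0 n 1).map (fun _ => "")) = List.replicate n.toNat "" := by
  rw [PySem.List.pyRange_one, List.map_map]
  simp [Function.comp_def, List.map_const']

theorem pvFoldlCongr {α β : Type} (l : List β) (f g : α → β → α) (init : α)
    (h : ∀ a b, f a b = g a b) : l.foldl f init = l.foldl g init := by
  have hfg : f = g := funext fun a => funext fun b => h a b
  rw [hfg]

theorem pvAltEq (ng src : List String) (n : Int) (hn : 1 ≤ n) :
    makeUniqNgrams_alt ng src n
      = (List.range (src.length + 1 - n.toNat)).foldl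
          (fun g k => pvAddJoin g ((src.drop k).take n.toNat)) ng := by
  unfold makeUniqNgrams_alt
  rw [if_pos hn, PySem.List.pyRange_one]
  have hn' : ((n.toNat : Nat) : Int) = n := Int.toNat_of_nonneg (by omega)
  have hlen : (PySem.List.len src - n + 1 - 0).toNat = src.length + 1 - n.toNat := by
    simp [PySem.List.len]
    omega
  rw [hlen, List.foldl_map]
  exact pvFoldlCongr _ _ _ _ (fun a k => by
    rw [zero_add, ← hn', PySem.List.slice_natCast_add]
    rfl)

-- ===== VERDICT (by name: the statement is the Claim_ definition above) =====
theorem pvRotSnoc (t : List String) (x : String) : pvRot (t ++ [x]) t.length = x :: t := by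
  unfold pvRot
  rw [List.drop_left, List.take_left]
  rfl

theorem makeUniqNgrams_spec : Claim_equal_makeUniqNgrams := by
  intro ngrams src n _ hPre
  unfold Spec_makeUniqNgrams
  by_cases hn : 1 ≤ n
  · unfold makeUniqNgrams
    rw [pvBuf0, pvAltEq ngrams src n hn]
    show (src.foldl (pvStepA n) (ngrams, List.replicate n.toNat "", 0, 0)).1
        = (List.range (src.length + 1 - n.toNat)).foldl
            (fun g k => pvAddJoin g ((src.drop k).take n.toNat)) ngrams
    by_cases hL : src.length ≤ n.toNat - 1
    · have h0 := pvFillA n hn src [] ngrams (by simpa using hL)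
      simp only [List.nil_append, List.length_nil, Nat.sub_zero, Nat.cast_zero] at h0
      rw [h0]
      have hc : src.length + 1 - n.toNat = 0 := by omega
      rw [hc]
      simp
    · have hge : n.toNat - 1 ≤ src.length := by omega
      have htl : (src.take (n.toNat - 1)).length = n.toNat - 1 := by
        simp [min_eq_left hge]
      conv_lhs => rw [(List.take_append_drop (n.toNat - 1) src).symm]
      rw [List.foldl_append]
      have h0 := pvFillA n hn (src.take (n.toNat - 1)) [] ngrams (by simp [htl])
      simp only [List.nil_append, List.length_nil, Nat.sub_zero, Nat.cast_zero] at h0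
      rw [h0, htl]
      have hrep1 : n.toNat - (n.toNat - 1) = 1 := by omega
      have hnum : ((n.toNat - 1 : Nat) : Int) = n - 1 := by omega
      rw [hrep1, List.replicate_one]
      rw [show (ngrams, List.take (n.toNat - 1) src ++ [""], ((n.toNat - 1 : Nat) : Int),
            ((n.toNat - 1 : Nat) : Int))
          = (ngrams, List.take (n.toNat - 1) src ++ [""], n - 1, ((n.toNat - 1 : Nat) : Int))
          from by rw [hnum]]
      have hbl : (src.take (n.toNat - 1) ++ [""]).length = n.toNat := by
        simp [htl]
        omega
      rw [pvMainA n hn _ ngrams _ (n.toNat - 1) hbl (by omega)]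
      have hrot := pvRotSnoc (src.take (n.toNat - 1)) ""
      rw [htl] at hrot
      rw [hrot, pvCoreW_windows _ _ (by simp)]
      simp only [List.tail_cons, List.take_append_drop, List.length_cons, htl]
      have hc : (src.drop (n.toNat - 1)).length = src.length + 1 - n.toNat := by
        simp
        omega
      have hN : n.toNat - 1 + 1 = n.toNat := by omega
      rw [hc, hN, List.foldl_map]
  · have hsrc : src = [] := hPre.resolve_right hn
    subst hsrc
    unfold makeUniqNgrams makeUniqNgrams_alt
    rw [if_neg hn]
    rfl
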